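-- pv_equiv track=rewrite | github.com/mahmoud791/KenKen-solver-with-GUI | kenken.py | conflicting
-- ===== SOURCE A (Python) =====
-- def conflicting(A, a, B, b):
--
--     for i in range(len(A)):
--         for j in range(len(B)):
--             mA = A[i]
--             mB = B[j]
--
--             ma = a[i]
--             mb = b[j]
--             if ((mA[0] == mB[0]) != (mA[1] == mB[1])) and ma == mb:
--                 return True
--
--     return False
-- ===== SOURCE B (Python) =====
-- def conflicting(A, a, B, b):
--     # Index B's cells by (value, row) and (value, col); each entry keeps the
--     # first coordinate seen and whether a different one was also seen, which
--     # is enough to answer "is there a matching cell with a different col/row"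
--     # with two dictionary lookups per A cell.
--     by_row = {}
--     by_col = {}
--     for (r, c), v in zip(B, b):
--         e = by_row.get((v, r))
--         if e is None:
--             by_row[(v, r)] = (c, False)
--         elif e[0] != c:
--             by_row[(v, r)] = (e[0], True)
--         e = by_col.get((v, c))
--         if e is None:
--             by_col[(v, c)] = (r, False)
--         elif e[0] != r:
--             by_col[(v, c)] = (e[0], True)
--     for (r, c), v in zip(A, a):
--         e = by_row.get((v, r))
--         if e is not None and (e[1] or e[0] != c):
--             return True
--         e = by_col.get((v, c))
--         if e is not None and (e[1] or e[0] != r):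
--             return True
--     return False
-- ===== Notes on version B (the rewrite author's own statement) =====
-- stated objective: alternative
-- what changed: Replaces the nested all-pairs scan with two hash indexes over B's cells keyed by (value,row) and (value,col), each storing the first coordinate seen plus a seen-another-distinct flag, so the inner scan over B disappears (worst-case O(|A|+|B|) vs O(|A|*|B|), though A can exit early on conflicting inputs).
-- outside the precondition, e.g. on conflicting([(0, 0), (1, 1)], [5], [(5, 5)], [7, 7]): A raises IndexError, B returns False; on conflicting([(0, 0), (2, 2)], [5], [(0, 1)], [5]): A returns True, B returns True
import Mathlib
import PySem

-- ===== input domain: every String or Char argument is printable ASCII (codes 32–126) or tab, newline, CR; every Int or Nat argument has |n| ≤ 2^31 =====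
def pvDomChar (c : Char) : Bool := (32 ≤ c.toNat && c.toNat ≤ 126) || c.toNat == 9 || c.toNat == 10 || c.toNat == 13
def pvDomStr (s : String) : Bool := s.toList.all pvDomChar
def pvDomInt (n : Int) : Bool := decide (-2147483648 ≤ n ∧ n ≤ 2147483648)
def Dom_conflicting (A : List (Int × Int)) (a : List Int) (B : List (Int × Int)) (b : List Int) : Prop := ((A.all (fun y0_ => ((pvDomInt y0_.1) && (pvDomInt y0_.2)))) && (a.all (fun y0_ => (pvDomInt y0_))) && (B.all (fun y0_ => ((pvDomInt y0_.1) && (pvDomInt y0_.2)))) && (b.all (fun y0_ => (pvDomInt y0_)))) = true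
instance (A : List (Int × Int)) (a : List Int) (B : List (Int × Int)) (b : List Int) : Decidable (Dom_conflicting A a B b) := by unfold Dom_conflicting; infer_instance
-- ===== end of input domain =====

-- B replaces A's nested all-pairs scan with two dictionaries indexing B's cells by
-- (value,row) / (value,col), each entry keeping the first coordinate and a
-- seen-another-distinct flag, so the inner scan over B disappears.


-- ===== PORT A =====
-- inner 'for j in range(len(B))' loop (early return True)
def conflictingInner (A : List (Int × Int)) (a : List Int) (B : List (Int × Int)) (b : List Int) (i : Int) : List Int → Bool
  | [] => false
  | j :: js =>
    let mA := PySem.List.pyGetD A i ((0 : Int), (0 : Int))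
    let mB := PySem.List.pyGetD B j ((0 : Int), (0 : Int))
    let ma := PySem.List.pyGetD a i (0 : Int)
    let mb := PySem.List.pyGetD b j (0 : Int)
    if ((mA.1 == mB.1) != (mA.2 == mB.2)) && (ma == mb) then true
    else conflictingInner A a B b i js

-- outer 'for i in range(len(A))' loop
def conflictingOuter (A : List (Int × Int)) (a : List Int) (B : List (Int × Int)) (b : List Int) : List Int → Bool
  | [] => false
  | i :: is =>
    if conflictingInner A a B b i (PySem.List.pyRange 0 (B.length : Int) 1) then true
    else conflictingOuter A a B b is

def conflicting (A : List (Int × Int)) (a : List Int) (B : List (Int × Int)) (b : List Int) : Bool :=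
  conflictingOuter A a B b (PySem.List.pyRange 0 (A.length : Int) 1)

-- ===== PORT B =====
-- dict entry update: first coordinate seen + "saw a different one" flag
def pvUpd (d : PySem.Dict (Int × Int) (Int × Bool)) (key : Int × Int) (c : Int) : PySem.Dict (Int × Int) (Int × Bool) :=
  match d.get? key with
  | none => d.insert key (c, false)
  | some e => if e.1 != c then d.insert key (e.1, true) else d

-- 'e is not None and (e[1] or e[0] != c)'
def pvCheck (d : PySem.Dict (Int × Int) (Int × Bool)) (key : Int × Int) (c : Int) : Bool :=
  match d.get? key with
  | none => false
  | some e => e.2 || (e.1 != c)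

-- the indexing loop over B's cells: builds (by_row, by_col)
def pvBuild (B : List (Int × Int)) (b : List Int) :
    PySem.Dict (Int × Int) (Int × Bool) × PySem.Dict (Int × Int) (Int × Bool) :=
  (B.zip b).foldl
    (fun ds q => (pvUpd ds.1 (q.2, q.1.1) q.1.2, pvUpd ds.2 (q.2, q.1.2) q.1.1))
    (PySem.Dict.empty, PySem.Dict.empty)

def conflicting_alt (A : List (Int × Int)) (a : List Int) (B : List (Int × Int)) (b : List Int) : Bool :=
  let ds := pvBuild B b
  (A.zip a).any (fun p => pvCheck ds.1 (p.2, p.1.1) p.1.2 || pvCheck ds.2 (p.2, p.1.2) p.1.1)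

-- ===== PRECONDITION & SPEC =====
-- Pre_ excludes inputs whose value lists are shorter than the (both nonempty) cell
-- lists: there A indexes a[i] / b[j] out of range and (except when an earlier pair
-- already returns True) raises IndexError; with A or B empty nothing is indexed.
def Pre_conflicting (A : List (Int × Int)) (a : List Int) (B : List (Int × Int)) (b : List Int) : Prop :=
  (A = [] ∨ B = []) ∨ (A.length ≤ a.length ∧ B.length ≤ b.length)
instance (A : List (Int × Int)) (a : List Int) (B : List (Int × Int)) (b : List Int) : Decidable (Pre_conflicting A a B b) := by unfold Pre_conflicting; infer_instance

def pvWitness_conflicting : (List (Int × Int)) × List Int × (List (Int × Int)) × List Int :=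
  ([(0, 0), (1, 2)], [1, 2], [(0, 1), (2, 2)], [1, 3])

def Spec_conflicting (A : List (Int × Int)) (a : List Int) (B : List (Int × Int)) (b : List Int) (out : Bool) : Prop := out = conflicting_alt A a B b
instance (A : List (Int × Int)) (a : List Int) (B : List (Int × Int)) (b : List Int) (out : Bool) : Decidable (Spec_conflicting A a B b out) := by unfold Spec_conflicting; infer_instance

-- ===== CLAIM (what is proved, stated in full; the proofs are below) =====
def Claim_equal_conflicting : Prop := ∀ (A : List (Int × Int)) (a : List Int) (B : List (Int × Int)) (b : List Int), Dom_conflicting A a B b → Pre_conflicting A a B b → Spec_conflicting A a B b (conflicting A a B b)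

-- ===== LEMMAS AND PROOFS =====

-- the boolean condition A tests for one pair of cells
def pvCond (p q : (Int × Int) × Int) : Bool :=
  ((p.1.1 == q.1.1) != (p.1.2 == q.1.2)) && (p.2 == q.2)

lemma inner_eq_any (A : List (Int × Int)) (a : List Int) (B : List (Int × Int)) (b : List Int) (i : Int) (js : List Int) :
    conflictingInner A a B b i js =
      js.any (fun j => pvCond (PySem.List.pyGetD A i ((0:Int),(0:Int)), PySem.List.pyGetD a i (0:Int))
                              (PySem.List.pyGetD B j ((0:Int),(0:Int)), PySem.List.pyGetD b j (0:Int))) := by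
  induction js with
  | nil => rfl
  | cons j js ih =>
    rw [List.any_cons, ← ih]
    simp only [conflictingInner, pvCond]
    split
    · next h => simp [h]
    · next h =>
      have h' : (((PySem.List.pyGetD A i ((0:Int),(0:Int))).1 == (PySem.List.pyGetD B j ((0:Int),(0:Int))).1) !=
          ((PySem.List.pyGetD A i ((0:Int),(0:Int))).2 == (PySem.List.pyGetD B j ((0:Int),(0:Int))).2) &&
          (PySem.List.pyGetD a i (0:Int) == PySem.List.pyGetD b j (0:Int))) = false := by
        revert h; cases (((PySem.List.pyGetD A i ((0:Int),(0:Int))).1 == (PySem.List.pyGetD B j ((0:Int),(0:Int))).1) !=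
          ((PySem.List.pyGetD A i ((0:Int),(0:Int))).2 == (PySem.List.pyGetD B j ((0:Int),(0:Int))).2) &&
          (PySem.List.pyGetD a i (0:Int) == PySem.List.pyGetD b j (0:Int))) <;> simp
      rw [h']
      simp

lemma outer_eq_any (A : List (Int × Int)) (a : List Int) (B : List (Int × Int)) (b : List Int) (is : List Int) :
    conflictingOuter A a B b is =
      is.any (fun i => conflictingInner A a B b i (PySem.List.pyRange 0 (B.length : Int) 1)) := by
  induction is with
  | nil => rfl
  | cons i is ih =>
    rw [List.any_cons, ← ih]
    simp only [conflictingOuter]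
    cases h : conflictingInner A a B b i (PySem.List.pyRange 0 (B.length : Int) 1) <;> simp [h]

lemma any_range_zip {α β : Type} (g : α → β → Bool) (dX : α) (dx : β) :
    ∀ (X : List α) (xs : List β), X.length ≤ xs.length →
      ((List.range X.length).any (fun k => g (X.getD k dX) (xs.getD k dx))) =
        (X.zip xs).any (fun p => g p.1 p.2) := by
  intro X
  induction X with
  | nil => intro xs _; rfl
  | cons x X ih =>
    intro xs hlen
    cases xs with
    | nil => simp at hlen
    | cons y ys =>
      simp only [List.length_cons, List.range_succ_eq_map, List.any_cons, List.any_map,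
        List.zip_cons_cons, List.getD_cons_zero, List.getD_cons_succ, Function.comp_def]
      rw [ih ys (by simpa using hlen)]

-- what one dict entry must say about the association list l of (key, coordinate) pairs
def pvEntryOk (l : List ((Int × Int) × Int)) (key : Int × Int) : Option (Int × Bool) → Prop
  | none => ∀ p ∈ l, p.1 ≠ key
  | some e => (key, e.1) ∈ l ∧ (e.2 = true → ∃ c1, (key, c1) ∈ l ∧ c1 ≠ e.1) ∧
      (e.2 = false → ∀ c1, (key, c1) ∈ l → c1 = e.1)

-- d represents l
def pvReps (d : PySem.Dict (Int × Int) (Int × Bool)) (l : List ((Int × Int) × Int)) : Prop :=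
  ∀ key : Int × Int, pvEntryOk l key (d.get? key)

lemma pvReps_empty : pvReps PySem.Dict.empty [] := by
  intro key; rw [PySem.Dict.get?_empty]; intro p hp; simp at hp

lemma pvEntryOk_extend (l : List ((Int × Int) × Int)) (key key' : Int × Int) (c : Int)
    (o : Option (Int × Bool)) (hne : key ≠ key') (h : pvEntryOk l key' o) :
    pvEntryOk (l ++ [(key, c)]) key' o := by
  cases o with
  | none =>
    intro p hp
    rcases List.mem_append.mp hp with h1 | h1
    · exact h p h1
    · simp at h1; rw [h1]; exact hne
  | some e =>
    obtain ⟨hmem, htrue, hfalse⟩ := h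
    refine ⟨List.mem_append_left _ hmem, ?_, ?_⟩
    · intro ht; obtain ⟨c1, hc1, hc1ne⟩ := htrue ht
      exact ⟨c1, List.mem_append_left _ hc1, hc1ne⟩
    · intro hf c1 hc1
      rcases List.mem_append.mp hc1 with h1 | h1
      · exact hfalse hf c1 h1
      · simp at h1; exact absurd h1.1.symm hne

lemma pvUpd_none (d : PySem.Dict (Int × Int) (Int × Bool)) (key : Int × Int) (c : Int)
    (h : d.get? key = none) : pvUpd d key c = d.insert key (c, false) := by
  unfold pvUpd; rw [h]

lemma pvUpd_some (d : PySem.Dict (Int × Int) (Int × Bool)) (key : Int × Int) (c : Int)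
    (e : Int × Bool) (h : d.get? key = some e) :
    pvUpd d key c = if (e.1 != c) = true then d.insert key (e.1, true) else d := by
  unfold pvUpd; rw [h]

lemma pvReps_step (d : PySem.Dict (Int × Int) (Int × Bool)) (l : List ((Int × Int) × Int))
    (key : Int × Int) (c : Int) (h : pvReps d l) :
    pvReps (pvUpd d key c) (l ++ [(key, c)]) := by
  intro key'
  have hk := h key
  have hk' := h key'
  by_cases hkk : key' = key
  · subst hkk
    cases hd : d.get? key' with
    | none =>
      rw [hd] at hk'
      rw [pvUpd_none d key' c hd, PySem.Dict.get?_insert, if_pos rfl]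
      refine ⟨List.mem_append_right _ (by simp), ?_, ?_⟩
      · intro ht; simp at ht
      · intro _ c1 hc1
        rcases List.mem_append.mp hc1 with h1 | h1
        · exact absurd rfl (hk' _ h1)
        · simpa using h1
    | some e =>
      rw [hd] at hk'
      obtain ⟨hmem, htrue, hfalse⟩ := hk'
      rw [pvUpd_some d key' c e hd]
      by_cases hec : (e.1 != c) = true
      · rw [if_pos hec, PySem.Dict.get?_insert, if_pos rfl]
        refine ⟨List.mem_append_left _ hmem, ?_, ?_⟩
        · intro _
          exact ⟨c, List.mem_append_right _ (by simp), fun hcc => (by simpa [hcc] using hec)⟩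
        · intro hf; simp at hf
      · rw [if_neg hec, hd]
        have hec' : e.1 = c := by simp at hec; exact hec

        refine ⟨List.mem_append_left _ hmem, ?_, ?_⟩
        · intro ht; obtain ⟨c1, hc1, hc1ne⟩ := htrue ht
          exact ⟨c1, List.mem_append_left _ hc1, hc1ne⟩
        · intro hf c1 hc1
          rcases List.mem_append.mp hc1 with h1 | h1
          · exact hfalse hf c1 h1
          · simp at h1; rw [hec']; exact h1
  · have hkey : ∀ v, (d.insert key v).get? key' = d.get? key' :=
      fun v => PySem.Dict.get?_insert_of_ne d v hkk
    have hne : key ≠ key' := fun hh => hkk hh.symm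
    cases hd : d.get? key with
    | none => rw [pvUpd_none d key c hd, hkey]; exact pvEntryOk_extend l key key' c _ hne hk'
    | some e =>
      rw [pvUpd_some d key c e hd]
      by_cases hec : (e.1 != c) = true
      · rw [if_pos hec, hkey]; exact pvEntryOk_extend l key key' c _ hne hk'
      · rw [if_neg hec]; exact pvEntryOk_extend l key key' c _ hne hk'

lemma pvReps_foldl {γ : Type} (keyf : γ → Int × Int) (valf : γ → Int) :
    ∀ (l : List γ) (d : PySem.Dict (Int × Int) (Int × Bool)) (l0 : List ((Int × Int) × Int)),
      pvReps d l0 →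
      pvReps (l.foldl (fun d q => pvUpd d (keyf q) (valf q)) d)
             (l0 ++ l.map (fun q => (keyf q, valf q))) := by
  intro l
  induction l with
  | nil => intro d l0 h; simpa using h
  | cons q l ih =>
    intro d l0 h
    have := ih (pvUpd d (keyf q) (valf q)) (l0 ++ [(keyf q, valf q)]) (pvReps_step d l0 _ _ h)
    simpa [List.append_assoc] using this

lemma pvCheck_iff (d : PySem.Dict (Int × Int) (Int × Bool)) (l : List ((Int × Int) × Int))
    (h : pvReps d l) (key : Int × Int) (c : Int) :
    pvCheck d key c = true ↔ ∃ c1, (key, c1) ∈ l ∧ c1 ≠ c := by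
  have hk := h key
  unfold pvCheck
  cases hd : d.get? key with
  | none =>
    rw [hd] at hk
    simp only [Bool.false_eq_true, false_iff]
    rintro ⟨c1, hc1, -⟩
    exact hk _ hc1 rfl
  | some e =>
    rw [hd] at hk
    obtain ⟨hmem, htrue, hfalse⟩ := hk
    cases he : e.2 with
    | true =>
      simp only [he, Bool.true_or, true_iff]
      obtain ⟨c1, hc1, hne⟩ := htrue he
      by_cases hc : e.1 = c
      · exact ⟨c1, hc1, by rw [← hc]; exact hne⟩
      · exact ⟨e.1, hmem, hc⟩
    | false =>
      simp only [he, Bool.false_or, bne_iff_ne, ne_eq]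
      constructor
      · intro hne; exact ⟨e.1, hmem, hne⟩
      · rintro ⟨c1, hc1, hne⟩; rw [← hfalse he c1 hc1]; exact hne

lemma foldl_pair {γ δ ε : Type} (f : δ → γ → δ) (g : ε → γ → ε) :
    ∀ (l : List γ) (d1 : δ) (d2 : ε),
      l.foldl (fun ds q => (f ds.1 q, g ds.2 q)) (d1, d2) = (l.foldl f d1, l.foldl g d2) := by
  intro l
  induction l with
  | nil => intro d1 d2; rfl
  | cons q l ih => intro d1 d2; simp only [List.foldl_cons]; exact ih _ _

-- the per-A-cell condition of A, as a proposition
lemma pvCond_iff (p q : (Int × Int) × Int) :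
    pvCond p q = true ↔
      ((p.1.1 = q.1.1 ∧ p.1.2 ≠ q.1.2) ∨ (p.1.1 ≠ q.1.1 ∧ p.1.2 = q.1.2)) ∧ p.2 = q.2 := by
  unfold pvCond
  by_cases h1 : p.1.1 = q.1.1 <;> by_cases h2 : p.1.2 = q.1.2 <;> simp [h1, h2]

-- the per-A-cell condition of A equals B's two dictionary checks
lemma point_eq (B : List (Int × Int)) (b : List Int) (p : (Int × Int) × Int) :
    (B.zip b).any (fun q => pvCond p q) =
      (pvCheck ((B.zip b).foldl (fun d q => pvUpd d (q.2, q.1.1) q.1.2) PySem.Dict.empty) (p.2, p.1.1) p.1.2 ||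
       pvCheck ((B.zip b).foldl (fun d q => pvUpd d (q.2, q.1.2) q.1.1) PySem.Dict.empty) (p.2, p.1.2) p.1.1) := by
  have hr := pvReps_foldl (fun q : (Int × Int) × Int => (q.2, q.1.1)) (fun q => q.1.2) (B.zip b) PySem.Dict.empty [] pvReps_empty
  have hc := pvReps_foldl (fun q : (Int × Int) × Int => (q.2, q.1.2)) (fun q => q.1.1) (B.zip b) PySem.Dict.empty [] pvReps_empty
  simp only [List.nil_append] at hr hc
  rw [Bool.eq_iff_iff]
  rw [List.any_eq_true, Bool.or_eq_true,
    pvCheck_iff _ _ hr, pvCheck_iff _ _ hc]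
  simp only [List.mem_map, pvCond_iff]
  constructor
  · rintro ⟨q, hq, ⟨hrow, hcol⟩ | ⟨hrow, hcol⟩, hv⟩
    · exact Or.inl ⟨q.1.2, ⟨q, hq, by rw [hv, hrow]⟩, fun hh => hcol hh.symm⟩
    · exact Or.inr ⟨q.1.1, ⟨q, hq, by rw [hv, hcol]⟩, fun hh => hrow hh.symm⟩
  · rintro (⟨c1, ⟨q, hq, hkey⟩, hne⟩ | ⟨r1, ⟨q, hq, hkey⟩, hne⟩)
    · obtain ⟨h0, h3⟩ := Prod.mk.injEq .. ▸ hkey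
      obtain ⟨h1, h2⟩ := Prod.mk.injEq .. ▸ h0
      exact ⟨q, hq, Or.inl ⟨h2.symm, fun hh => hne (h3 ▸ hh.symm)⟩, h1.symm⟩
    · obtain ⟨h0, h3⟩ := Prod.mk.injEq .. ▸ hkey
      obtain ⟨h1, h2⟩ := Prod.mk.injEq .. ▸ h0
      exact ⟨q, hq, Or.inr ⟨fun hh => hne (h3 ▸ hh.symm), h2.symm⟩, h1.symm⟩

lemma conflicting_eq_zip_any (A : List (Int × Int)) (a : List Int) (B : List (Int × Int)) (b : List Int)
    (ha : A.length ≤ a.length) (hb : B.length ≤ b.length) :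
    conflicting A a B b = (A.zip a).any (fun p => (B.zip b).any (fun q => pvCond p q)) := by
  unfold conflicting
  rw [outer_eq_any]
  rw [PySem.List.pyRange_one]
  simp only [List.any_map, Function.comp_def, zero_add, Int.toNat_natCast, Int.sub_zero]
  have hinner : ∀ i : Int, conflictingInner A a B b i (PySem.List.pyRange 0 (B.length : Int) 1) =
      (B.zip b).any (fun q => pvCond (PySem.List.pyGetD A i ((0:Int),(0:Int)), PySem.List.pyGetD a i (0:Int)) q) := by
    intro i
    rw [inner_eq_any, PySem.List.pyRange_one]
    simp only [List.any_map, Function.comp_def, zero_add, Int.toNat_natCast, Int.sub_zero]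
    have := any_range_zip (fun (mB : Int × Int) (mb : Int) =>
      pvCond (PySem.List.pyGetD A i ((0:Int),(0:Int)), PySem.List.pyGetD a i (0:Int)) ((mB, mb))) ((0:Int),(0:Int)) (0:Int) B b hb
    simp only [PySem.List.pyGetD_natCast] at *
    exact this
  simp only [hinner]
  have := any_range_zip (fun (mA : Int × Int) (ma : Int) =>
    (B.zip b).any (fun q => pvCond ((mA, ma)) q)) ((0:Int),(0:Int)) (0:Int) A a ha
  simp only [PySem.List.pyGetD_natCast] at *
  exact this

-- ===== VERDICT (by name: the statement is the Claim_ definition above) =====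
lemma conflicting_nil_left (a : List Int) (B : List (Int × Int)) (b : List Int) :
    conflicting [] a B b = false := by
  unfold conflicting
  rw [PySem.List.pyRange_one_eq_nil (by simp)]
  rfl

lemma conflicting_nil_right (A : List (Int × Int)) (a : List Int) (b : List Int) :
    conflicting A a [] b = false := by
  unfold conflicting
  rw [outer_eq_any]
  have hnil : PySem.List.pyRange 0 ((List.length ([] : List (Int × Int))) : Int) 1 = [] :=
    PySem.List.pyRange_one_eq_nil (by simp)
  simp [hnil, conflictingInner]

theorem conflicting_spec : Claim_equal_conflicting := by
  intro A a B b _ hpre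
  show conflicting A a B b = conflicting_alt A a B b
  rcases hpre with (hA | hB) | ⟨ha, hb⟩
  · subst hA
    rw [conflicting_nil_left]
    rfl
  · subst hB
    rw [conflicting_nil_right]
    unfold conflicting_alt pvBuild
    simp [pvCheck, PySem.Dict.get?_empty]
  · rw [conflicting_eq_zip_any A a B b ha hb]
    unfold conflicting_alt
    show _ = (A.zip a).any
      (fun p => pvCheck (pvBuild B b).1 (p.2, p.1.1) p.1.2 || pvCheck (pvBuild B b).2 (p.2, p.1.2) p.1.1)
    unfold pvBuild
    rw [foldl_pair (fun d (q : (Int × Int) × Int) => pvUpd d (q.2, q.1.1) q.1.2)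
        (fun d (q : (Int × Int) × Int) => pvUpd d (q.2, q.1.2) q.1.1)
        (B.zip b) PySem.Dict.empty PySem.Dict.empty]
    simp only [point_eq]
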